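-- pv_equiv track=rewrite | github.com/isk02206/python | informatics/previous informatics/Infomatics-1/Info_group_serise6/Single-nucleotide_polymorphism.py | SNPs
-- ===== SOURCE A (Python) =====
-- def SNP(seq1, seq2):
--
--     if len(seq1) != len(seq2):
--         return None
--
--     list1 = []
--     pos = 0
--
--     while pos < len(seq1):
--
--         if seq1[pos] != seq2[pos]:
--             list1.append((pos,seq1[pos],seq2[pos]))
--
--         pos += 1
--
--     if len(list1) == 1:
--         return list1[0]
--
-- def SNPs(DNA, seq):
--
--     pos = 0
--     std = len(seq)
--     list1 = []
--
--     while std <= len(DNA):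
--
--         if SNP(DNA[pos:std],seq):
--             count = pos + SNP(DNA[pos:std],seq)[0]
--             list1.append(count)
--
--         pos += 1
--         std += 1
--
--     return sorted(list1)
-- ===== SOURCE B (Python) =====
-- def SNPs(DNA, seq):
--     # Different strategy: instead of collecting all mismatches per window and
--     # checking the count (A), find the first mismatch position p by an
--     # early-exit scan and accept the window iff the two tails after p are equal.
--     m = len(seq)
--     out = []
--     for i in range(len(DNA) - m + 1):
--         p = 0
--         while p < m and DNA[i + p] == seq[p]:
--             p += 1
--         if p < m and DNA[i + p + 1:i + m] == seq[p + 1:]: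
--             out.append(i + p)
--     return sorted(out)
-- ===== Notes on version B (the rewrite author's own statement) =====
-- stated objective: faster
-- what changed: Instead of building the full mismatch list of every window (twice) and testing its length, B finds the first mismatch position with an early-exit scan and accepts the window iff the tails after it are equal (one slice comparison).
import Mathlib
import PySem

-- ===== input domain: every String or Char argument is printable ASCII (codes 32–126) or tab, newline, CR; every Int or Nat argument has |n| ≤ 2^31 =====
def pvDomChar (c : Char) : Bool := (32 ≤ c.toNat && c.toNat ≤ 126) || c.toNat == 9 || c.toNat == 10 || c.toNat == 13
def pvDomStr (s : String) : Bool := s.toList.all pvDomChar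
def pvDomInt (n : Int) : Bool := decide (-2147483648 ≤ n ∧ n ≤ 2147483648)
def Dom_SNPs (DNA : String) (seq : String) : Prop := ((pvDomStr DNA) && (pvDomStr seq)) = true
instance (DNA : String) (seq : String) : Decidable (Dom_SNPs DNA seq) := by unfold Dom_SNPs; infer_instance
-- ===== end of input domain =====

-- B replaces A's per-window "collect all mismatches, check the count is 1" (computed twice) by an
-- early-exit scan for the first mismatch followed by one tail comparison; same return value.

-- ===== PORT A =====
-- while loop of SNP: collects (pos, seq1[pos], seq2[pos]) for every mismatching position.
-- Indexing uses pyGetD; exact because the loop guard gives pos < len seq1 and SNP only reaches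
-- the loop with len seq1 = len seq2.
def SNP_loop (seq1 seq2 : List Char) (pos : Nat) (list1 : List (Int × Char × Char)) :
    List (Int × Char × Char) :=
  if _h : pos < seq1.length then
    SNP_loop seq1 seq2 (pos + 1)
      (if PySem.List.pyGetD seq1 (pos : Int) ' ' ≠ PySem.List.pyGetD seq2 (pos : Int) ' ' then
        list1 ++ [((pos : Int), PySem.List.pyGetD seq1 (pos : Int) ' ',
                   PySem.List.pyGetD seq2 (pos : Int) ' ')]
      else list1)
  else list1
termination_by seq1.length - pos

def SNP (seq1 seq2 : List Char) : Option (Int × Char × Char) :=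
  if seq1.length ≠ seq2.length then none
  else
    let list1 := SNP_loop seq1 seq2 0 []
    if list1.length = 1 then PySem.List.pyGet? list1 0 else none

-- outer while loop of SNPs; Python's `if SNP(...): ... SNP(...)[0]` is ported as one match on
-- the (pure) SNP result: a tuple is truthy, None is falsy.
def SNPs_loop (D S : List Char) (pos std : Nat) (list1 : List Int) : List Int :=
  if _h : std ≤ D.length then
    SNPs_loop D S (pos + 1) (std + 1)
      (match SNP (PySem.List.slice D (some (pos : Int)) (some (std : Int))) S with
       | some t => list1 ++ [(pos : Int) + t.1]
       | none => list1)
  else list1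
termination_by D.length + 1 - std

def SNPs (DNA : String) (seq : String) : List Int :=
  PySem.List.sorted (SNPs_loop DNA.toList seq.toList 0 seq.toList.length []) (fun x => x) false

-- ===== PORT B =====
-- inner while of Source B: advance p while p < m and DNA[i+p] == seq[p].
-- Indexing uses pyGetD; exact because Source B only reaches it with 0 ≤ i ≤ len(DNA)-m and 0 ≤ p < m.
def bscan (D S : List Char) (i : Int) (m : Int) (p : Int) : Int :=
  if h : p < m ∧ PySem.List.pyGetD D (i + p) ' ' = PySem.List.pyGetD S p ' ' then
    bscan D S i m (p + 1)
  else p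
termination_by (m - p).toNat
decreasing_by omega

def SNPs_alt (DNA : String) (seq : String) : List Int :=
  let D := DNA.toList
  let S := seq.toList
  let m : Int := S.length
  let out := (PySem.List.pyRange 0 ((D.length : Int) - m + 1) 1).foldl
    (fun out i =>
      let p := bscan D S i m 0
      if p < m ∧ PySem.List.slice D (some (i + p + 1)) (some (i + m)) =
                 PySem.List.slice S (some (p + 1)) none then
        out ++ [i + p]
      else out) []
  PySem.List.sorted out (fun x => x) false

-- ===== PRECONDITION & SPEC =====
def Spec_SNPs (DNA : String) (seq : String) (out : List Int) : Prop := out = SNPs_alt DNA seq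
instance (DNA : String) (seq : String) (out : List Int) : Decidable (Spec_SNPs DNA seq out) := by unfold Spec_SNPs; infer_instance

-- ===== CLAIM (what is proved, stated in full; the proofs are below) =====
def Claim_equal_SNPs : Prop := ∀ (DNA : String) (seq : String), Dom_SNPs DNA seq → Spec_SNPs DNA seq (SNPs DNA seq)

-- ===== LEMMAS AND PROOFS =====

-- mismatch list of two (equal-length) windows, positions starting at k
def mism : List Char → List Char → Nat → List (Int × Char × Char)
  | a :: w, b :: s, k =>
      (if a ≠ b then [((k : Int), a, b)] else []) ++ mism w s (k + 1)
  | _, _, _ => []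

-- index of the first mismatch (length if none)
def firstMism : List Char → List Char → Nat
  | a :: w, b :: s => if a = b then firstMism w s + 1 else 0
  | _, _ => 0

theorem mism_eq_nil_iff (w s : List Char) (h : w.length = s.length) (k : Nat) :
    mism w s k = [] ↔ w = s := by
  induction w generalizing s k with
  | nil => cases s with
    | nil => simp [mism]
    | cons b s => simp at h
  | cons a w ih =>
    cases s with
    | nil => simp at h
    | cons b s =>
      simp only [List.length_cons, Nat.add_right_cancel_iff] at h
      by_cases hab : a = b
      · subst hab; simp [mism, ih s h (k + 1)]
      · simp [mism, hab]

theorem firstMism_le (w s : List Char) : firstMism w s ≤ w.length := by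
  induction w generalizing s with
  | nil => simp [firstMism]
  | cons a w ih =>
    cases s with
    | nil => simp [firstMism]
    | cons b s =>
      by_cases hab : a = b
      · simpa [firstMism, hab] using ih s
      · simp [firstMism, hab]

theorem mism_length_one_iff (w s : List Char) (h : w.length = s.length) (k : Nat) :
    ((mism w s k).length = 1 ↔
      (firstMism w s < w.length ∧ w.drop (firstMism w s + 1) = s.drop (firstMism w s + 1))) ∧
    ((mism w s k).length = 1 →
      mism w s k = [(((k + firstMism w s : Nat) : Int),
        w.getD (firstMism w s) ' ', s.getD (firstMism w s) ' ')]) := by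
  induction w generalizing s k with
  | nil => cases s with
    | nil => simp [mism, firstMism]
    | cons b s => simp at h
  | cons a w ih =>
    cases s with
    | nil => simp at h
    | cons b s =>
      simp only [List.length_cons, Nat.add_right_cancel_iff] at h
      by_cases hab : a = b
      · subst hab
        have hI := ih s h (k + 1)
        constructor
        · have : mism (a :: w) (a :: s) k = mism w s (k + 1) := by simp [mism]
          rw [this, hI.1]
          simp [firstMism]
        · intro h1
          have h1' : (mism w s (k + 1)).length = 1 := by simpa [mism] using h1
          have h2 := hI.2 h1'
          have : mism (a :: w) (a :: s) k = mism w s (k + 1) := by simp [mism]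
          rw [this, h2]
          simp [firstMism]
          all_goals omega
      · have hm : mism (a :: w) (b :: s) k = ((k : Int), a, b) :: mism w s (k + 1) := by
          simp [mism, hab]
        constructor
        · rw [hm]
          simp only [List.length_cons, firstMism, if_neg hab]
          constructor
          · intro h1
            have h0 : mism w s (k + 1) = [] := by
              cases hmm : mism w s (k + 1) <;> simp [hmm] at h1 ⊢
            exact ⟨Nat.succ_pos _, by simpa using (mism_eq_nil_iff w s h (k + 1)).1 h0⟩
          · rintro ⟨-, hd⟩
            have hws : w = s := by simpa using hd
            simp [(mism_eq_nil_iff w s h (k + 1)).2 hws]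
        · intro h1
          rw [hm] at h1 ⊢
          have h0 : mism w s (k + 1) = [] := by
            cases hmm : mism w s (k + 1) <;> simp [hmm] at h1 ⊢
          simp [h0, firstMism, hab]

theorem SNP_loop_eq_mism (w s : List Char) (h : w.length = s.length) :
    ∀ (pos : Nat) (acc : List (Int × Char × Char)),
      SNP_loop w s pos acc = acc ++ mism (w.drop pos) (s.drop pos) pos := by
  intro pos
  induction hfuel : w.length - pos generalizing pos with
  | zero =>
    intro acc
    have hpos : ¬ pos < w.length := by omega
    rw [SNP_loop, dif_neg hpos]
    rw [List.drop_eq_nil_of_le (by omega)]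
    simp [mism]
  | succ n ih =>
    intro acc
    have hpos : pos < w.length := by omega
    have hpos' : pos < s.length := by omega
    rw [SNP_loop, dif_pos hpos]
    rw [ih (pos + 1) (by omega)]
    have hw : w.drop pos = w[pos] :: w.drop (pos + 1) := List.drop_eq_getElem_cons hpos
    have hs : s.drop pos = s[pos] :: s.drop (pos + 1) := List.drop_eq_getElem_cons hpos'
    rw [hw, hs]
    have g1 : PySem.List.pyGetD w (pos : Int) ' ' = w[pos] := by
      simp [List.getD_eq_getElem?_getD, hpos]
    have g2 : PySem.List.pyGetD s (pos : Int) ' ' = s[pos] := by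
      simp [List.getD_eq_getElem?_getD, hpos']
    rw [g1, g2]
    by_cases hab : w[pos] = s[pos]
    · simp [mism, hab]
    · simp [mism, hab]

theorem bscan_eq_firstMism (D S : List Char) (j m : Nat) (hm : S.length = m)
    (hjm : j + m ≤ D.length) :
    ∀ (p : Nat), p ≤ m →
      bscan D S (j : Int) (m : Int) (p : Int) =
        ((p + firstMism (((D.drop j).take m).drop p) (S.drop p) : Nat) : Int) := by
  intro p
  induction hfuel : m - p generalizing p with
  | zero =>
    intro hp
    have hpm : p = m := by omega
    rw [bscan, dif_neg (by rintro ⟨h1, -⟩; omega)]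
    subst hpm
    rw [List.drop_eq_nil_of_le (by simp), List.drop_eq_nil_of_le (by omega)]
    simp [firstMism]
  | succ n ih =>
    intro hp
    have hpm : p < m := by omega
    have hD : j + p < D.length := by omega
    have hS : p < S.length := by omega
    have hw : (((D.drop j).take m).drop p) = D[j + p]'hD :: ((D.drop j).take m).drop (p + 1) := by
      rw [List.drop_eq_getElem_cons (by simp; omega)]
      congr 1
      rw [List.getElem_take, List.getElem_drop]
    have hs : S.drop p = S[p] :: S.drop (p + 1) := List.drop_eq_getElem_cons hS
    have g1 : PySem.List.pyGetD D ((j : Int) + (p : Int)) ' ' = D[j + p] := by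
      have h1 : (j:Int) + (p:Int) < (D.length : Int) := by omega
      rw [PySem.List.pyGetD_eq_getElem _ _ (by positivity) (by simpa using h1)]
      congr 1
    have g2 : PySem.List.pyGetD S ((p : Nat) : Int) ' ' = S[p] := by
      simp [List.getD_eq_getElem?_getD, hS]
    rw [bscan]
    by_cases hab : D[j + p] = S[p]
    · rw [dif_pos ⟨by exact_mod_cast hpm, by rw [g1, g2]; exact hab⟩]
      rw [show ((p : Int) + 1) = ((p + 1 : Nat) : Int) by push_cast; ring]
      rw [ih (p + 1) (by omega) (by omega)]
      rw [hw, hs]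
      simp [firstMism, hab]
      omega
    · rw [dif_neg (by rintro ⟨-, he⟩; rw [g1, g2] at he; exact hab he)]
      rw [hw, hs]
      simp [firstMism, hab]

theorem SNPs_loop_eq_fold (D S : List Char) :
    ∀ (j : Nat) (acc : List Int),
      SNPs_loop D S j (j + S.length) acc =
        (PySem.List.pyRange (j : Int) ((D.length : Int) - S.length + 1) 1).foldl
          (fun out i =>
            let p := bscan D S i (S.length : Int) 0
            if p < (S.length : Int) ∧
                PySem.List.slice D (some (i + p + 1)) (some (i + (S.length : Int))) =
                PySem.List.slice S (some (p + 1)) none then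
              out ++ [i + p]
            else out) acc := by
  set m := S.length with hmdef
  intro j
  induction hfuel : D.length + 1 - (j + m) generalizing j with
  | zero =>
    intro acc
    have hstop : ¬ (j + m ≤ D.length) := by omega
    rw [SNPs_loop, dif_neg hstop]
    rw [PySem.List.pyRange_one_eq_nil (by omega)]
    rfl
  | succ n ih =>
    intro acc
    have hgo : j + m ≤ D.length := by omega
    -- the window
    set w : List Char := (D.drop j).take m with hwdef
    have hwslice : PySem.List.slice D (some (j : Int)) (some ((j + m : Nat) : Int)) = w := by
      rw [PySem.List.slice_natCast]
      simp [hwdef]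
    have hwlen : w.length = m := by
      simp [hwdef]; omega
    set f : Nat := firstMism w S with hfdef
    have hfm : f ≤ m := by rw [← hwlen]; exact firstMism_le w S
    -- bscan value
    have hbscan : bscan D S (j : Int) (m : Int) 0 = ((f : Nat) : Int) := by
      have := bscan_eq_firstMism D S j m rfl hgo 0 (by omega)
      simpa [hwdef] using this
    -- slice identities for B's condition
    have hsliceD : PySem.List.slice D (some ((j : Int) + (f : Int) + 1)) (some ((j : Int) + (m : Int))) =
        (D.drop (j + f + 1)).take (m - (f + 1)) := by
      rw [PySem.List.slice_toNat _ (by positivity) (by positivity)]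
      have h1 : ((j : Int) + (f : Int) + 1).toNat = j + f + 1 := by omega
      have h2 : ((j : Int) + (m : Int)).toNat = j + m := by omega
      rw [h1, h2]
      congr 1
      omega
    have hsliceS : PySem.List.slice S (some ((f : Int) + 1)) none = S.drop (f + 1) := by
      rw [PySem.List.slice_from _ (by positivity)]
      have h1 : ((f : Int) + 1).toNat = f + 1 := by omega
      rw [h1]
    have hdropw : w.drop (f + 1) = (D.drop (j + f + 1)).take (m - (f + 1)) := by
      rw [hwdef, List.drop_take, List.drop_drop,
        show j + f + 1 = j + (f + 1) from by omega]
    -- SNP characterisation on the window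
    have hsnp := mism_length_one_iff w S (by omega) 0
    have hloop := SNP_loop_eq_mism w S (by omega) 0 []
    simp only [List.drop_zero, List.nil_append] at hloop
    -- peel one element of the range
    rw [PySem.List.pyRange_one_cons (by omega)]
    rw [List.foldl_cons]
    rw [SNPs_loop, dif_pos hgo]
    have hstep : (j + m) + 1 = (j + 1) + m := by omega
    rw [hstep, ih (j + 1) (by omega)]
    have hcast : ((j : Int) + 1) = ((j + 1 : Nat) : Int) := by push_cast; ring
    rw [hcast]
    congr 1
    -- now equality of the two accumulators after one step
    simp only [hwslice, hbscan]
    by_cases hc : f < m ∧ w.drop (f + 1) = S.drop (f + 1)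
    · -- exactly one mismatch: both append j + f
      have hlen1 : (mism w S 0).length = 1 := (hsnp.1).2 (by rw [hwlen]; exact hc)
      have hsing := hsnp.2 hlen1
      rw [SNP, if_neg (by omega)]
      simp only [hloop, hsing]
      rw [show ((0:Int)) = ((0:Nat):Int) by norm_num, PySem.List.pyGet?_natCast]
      simp only [List.getElem?_cons_zero]
      have hcond : ((f : Nat) : Int) < ((m : Nat) : Int) ∧
          PySem.List.slice D (some ((j : Int) + (f : Int) + 1)) (some ((j : Int) + (m : Int))) =
          PySem.List.slice S (some ((f : Int) + 1)) none :=
        ⟨by exact_mod_cast hc.1, by rw [hsliceD, hsliceS, ← hdropw]; exact hc.2⟩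
      rw [if_pos hcond, hfdef]
      simp
    · -- zero or ≥2 mismatches: neither appends
      have hlen1 : ¬ (mism w S 0).length = 1 := by
        rw [hsnp.1, hwlen]; exact hc
      rw [SNP, if_neg (by omega)]
      simp only [hloop, if_neg hlen1]
      rw [if_neg (by
        rintro ⟨h1, h2⟩
        rw [hsliceD, hsliceS, ← hdropw] at h2
        exact hc ⟨by exact_mod_cast h1, h2⟩)]

theorem SNPs_spec : Claim_equal_SNPs := by
  intro DNA seq _
  unfold Spec_SNPs SNPs SNPs_alt
  rw [show seq.toList.length = 0 + seq.toList.length from (Nat.zero_add _).symm,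
    SNPs_loop_eq_fold DNA.toList seq.toList 0 []]
  rfl
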